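-- pv_equiv track=rewrite | github.com/Agniy/pinterview | algorithms/recursion/factorial.py | factorial_big_int
-- ===== SOURCE A (Python) =====
-- def factorial_big_int(n):
--     """
--     Версия для больших чисел с использованием строк
--     """
--     if n < 0:
--         raise ValueError("Факториал определен только для неотрицательных чисел")
--
--     if n <= 1:
--         return "1"
--
--     result = "1"
--     for i in range(2, n + 1):
--         result = multiply_strings(result, str(i))
--
--     return result
--
-- def multiply_strings(num1, num2):
--     """
--     Умножение больших чисел в виде строк
--     """
--     m, n = len(num1), len(num2)
--     result = [0] * (m + n)
--
--     # Умножаем каждую цифру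
--     for i in range(m - 1, -1, -1):
--         for j in range(n - 1, -1, -1):
--             mul = int(num1[i]) * int(num2[j])
--             p1, p2 = i + j, i + j + 1
--             total = mul + result[p2]
--
--             result[p2] = total % 10
--             result[p1] += total // 10
--
--     # Убираем ведущие нули
--     start = 0
--     while start < len(result) and result[start] == 0:
--         start += 1
--
--     return ''.join(map(str, result[start:])) if start < len(result) else '0'
-- ===== SOURCE B (Python) =====
-- def factorial_big_int(n):
--     """
--     Версия для больших чисел с использованием строк
--     """
--     if n < 0:
--         raise ValueError("Факториал определен только для неотрицательных чисел")
--     result = 1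
--     for i in range(2, n + 1):
--         result *= i
--     return str(result)
-- ===== Notes on version B (the rewrite author's own statement) =====
-- stated objective: faster
-- what changed: B keeps the running product as a native Python big integer (result *= i) and converts once with str at the end, deleting the hand-rolled digit-by-digit string multiplication helper (multiply_strings) and its nested carry loops entirely.
import Mathlib
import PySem

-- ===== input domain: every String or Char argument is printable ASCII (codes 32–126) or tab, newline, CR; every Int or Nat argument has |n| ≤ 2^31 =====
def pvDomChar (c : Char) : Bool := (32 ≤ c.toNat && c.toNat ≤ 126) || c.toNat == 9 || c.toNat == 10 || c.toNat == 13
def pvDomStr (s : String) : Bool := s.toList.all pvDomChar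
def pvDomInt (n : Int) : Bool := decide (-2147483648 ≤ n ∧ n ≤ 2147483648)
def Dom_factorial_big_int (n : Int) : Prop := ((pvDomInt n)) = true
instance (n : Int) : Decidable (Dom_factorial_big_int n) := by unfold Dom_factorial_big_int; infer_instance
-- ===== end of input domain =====

-- B replaces A's hand-rolled decimal-string long multiplication by a native big-integer
-- running product converted to a string once at the end (objective: faster, in a timing run).

-- ===== PORT A =====

-- port of int(num1[i]) on a single character: PySem.Int.ofChars? [c]; the .getD 0 is
-- unreachable on the digit strings this helper receives (Python would raise ValueError there)
def pvDigitVal (c : Char) : Int := (PySem.Int.ofChars? [c]).getD 0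

-- body of the inner 'for j in range(n-1, -1, -1)' loop of multiply_strings
def pvRowStep (num1 num2 : List Char) (i : Int) (res : List Int) (j : Int) : List Int :=
  let mul := pvDigitVal (PySem.List.pyGetD num1 i ' ') * pvDigitVal (PySem.List.pyGetD num2 j ' ')
  let total := mul + PySem.List.pyGetD res (i + j + 1) 0
  let res1 := PySem.List.pySetD res (i + j + 1) (PySem.Int.mod total 10)
  PySem.List.pySetD res1 (i + j) (PySem.List.pyGetD res1 (i + j) 0 + PySem.Int.floordiv total 10)

-- port of the 'while start < len(result) and result[start] == 0: start += 1' loop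
def pvLeadZeros : List Int → Nat
  | [] => 0
  | d :: rest => if d = 0 then pvLeadZeros rest + 1 else 0

-- port of multiply_strings (on the char lists of its string arguments)
def pvMultiplyStrings (num1 num2 : List Char) : List Char :=
  let res0 : List Int := List.replicate (num1.length + num2.length) 0
  let res := (PySem.List.pyRange ((num1.length : Int) - 1) (-1) (-1)).foldl
    (fun r i => (PySem.List.pyRange ((num2.length : Int) - 1) (-1) (-1)).foldl
      (pvRowStep num1 num2 i) r) res0
  let start := pvLeadZeros res
  if start < res.length then
    -- ''.join(map(str, result[start:]))
    ((PySem.List.slice res (some (start : Int)) none).map PySem.Int.toChars).flatten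
  else ['0']

def factorial_big_int (n : Int) : String :=
  if n < 0 then ""          -- Python raises ValueError here; excluded by Pre_
  else if n ≤ 1 then "1"
  else String.ofList ((PySem.List.pyRange 2 (n + 1) 1).foldl
    (fun result i => pvMultiplyStrings result (PySem.Int.toChars i)) ['1'])

-- ===== PORT B =====
def factorial_big_int_alt (n : Int) : String :=
  if n < 0 then ""          -- Python raises ValueError here; excluded by Pre_
  else PySem.Int.toStr ((PySem.List.pyRange 2 (n + 1) 1).foldl (fun result i => result * i) 1)

-- ===== PRECONDITION & SPEC =====
-- Pre_ excludes exactly n < 0, where the Python A (and B) raise ValueError.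
def Pre_factorial_big_int (n : Int) : Prop := 0 ≤ n
instance (n : Int) : Decidable (Pre_factorial_big_int n) := by unfold Pre_factorial_big_int; infer_instance
def pvWitness_factorial_big_int : Int := (5)

def Spec_factorial_big_int (n : Int) (out : String) : Prop := out = factorial_big_int_alt n
instance (n : Int) (out : String) : Decidable (Spec_factorial_big_int n out) := by unfold Spec_factorial_big_int; infer_instance

-- ===== CLAIM (what is proved, stated in full; the proofs are below) =====
def Claim_equal_factorial_big_int : Prop := ∀ (n : Int), Dom_factorial_big_int n → Pre_factorial_big_int n → Spec_factorial_big_int n (factorial_big_int n)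

-- ===== LEMMAS AND PROOFS =====

-- value of a big-endian list of decimal digit values
def valN (l : List Int) : Int := l.foldl (fun a d => 10 * a + d) 0

-- all entries are decimal digit values
def Dig (l : List Int) : Prop := ∀ d ∈ l, 0 ≤ d ∧ d < 10

theorem valN_foldl (l : List Int) (a : Int) :
    l.foldl (fun a d => 10 * a + d) a = a * 10 ^ l.length + valN l := by
  induction l generalizing a with
  | nil => simp [valN]
  | cons x t ih =>
    simp only [List.foldl_cons, List.length_cons, valN]
    rw [ih, ih]
    ring

theorem valN_append (xs ys : List Int) :
    valN (xs ++ ys) = valN xs * 10 ^ ys.length + valN ys := by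
  simp only [valN, List.foldl_append]
  rw [valN_foldl]
  rfl

theorem valN_cons (x : Int) (t : List Int) : valN (x :: t) = x * 10 ^ t.length + valN t := by
  have := valN_append [x] t
  simpa [valN] using this

theorem valN_nonneg (l : List Int) (h : Dig l) : 0 ≤ valN l := by
  induction l with
  | nil => simp [valN]
  | cons x t ih =>
    rw [valN_cons]
    have hx := h x (by simp)
    have ht : 0 ≤ valN t := ih (fun d hd => h d (by simp [hd]))
    have : (0:Int) ≤ x * 10 ^ t.length := mul_nonneg hx.1 (by positivity)
    omega


theorem valN_lt (l : List Int) (h : Dig l) : valN l < 10 ^ l.length := by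
  induction l with
  | nil => simp [valN]
  | cons x t ih =>
    rw [valN_cons]
    have hx := h x (by simp)
    have ht : valN t < 10 ^ t.length := ih (fun d hd => h d (by simp [hd]))
    have h1 : x * 10 ^ t.length ≤ 9 * 10 ^ t.length := by
      have : (0:Int) < 10 ^ t.length := by positivity
      nlinarith
    simp only [List.length_cons]
    calc x * 10 ^ t.length + valN t < 9 * 10 ^ t.length + 10 ^ t.length := by omega
    _ = 10 ^ (t.length + 1) := by ring


theorem valN_set (l : List Int) (p : Nat) (hp : p < l.length) (v : Int) :
    valN (l.set p v) = valN l + (v - l.getD p 0) * 10 ^ (l.length - 1 - p) := by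
  have hl : l = l.take p ++ l[p] :: l.drop (p+1) := by
    rw [← List.drop_eq_getElem_cons hp, List.take_append_drop]
  have hget : l.getD p 0 = l[p] := List.getD_eq_getElem l 0 hp
  have hlen : (l.drop (p+1)).length = l.length - 1 - p := by
    simp only [List.length_drop]; omega
  have key : valN (l.take p ++ v :: l.drop (p+1)) =
      valN (l.take p ++ l[p] :: l.drop (p+1)) + (v - l[p]) * 10 ^ (l.drop (p+1)).length := by
    rw [valN_append, valN_append, valN_cons, valN_cons]
    simp only [List.length_cons]
    ring
  rw [List.set_eq_take_cons_drop v hp, key, ← hl, hget, hlen]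

theorem dig_getD (l : List Int) (h : Dig l) (k : Nat) (hk : k < l.length) :
    0 ≤ l.getD k 0 ∧ l.getD k 0 < 10 := by
  rw [List.getD_eq_getElem l 0 hk]
  exact h _ (l.getElem_mem hk)


theorem zeros_of_lt (l : List Int) (h : Dig l) (p : Nat) (hp : p ≤ l.length)
    (hv : valN l < 10 ^ (l.length - p)) : ∀ k < p, l.getD k 0 = 0 := by
  induction l generalizing p with
  | nil => intro k hk; simp
  | cons x t ih =>
    intro k hk
    match p, hp with
    | 0, _ => omega
    | q+1, hp =>
      have hx := h x (by simp)
      have ht : Dig t := fun d hd => h d (by simp [hd])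
      have htn : 0 ≤ valN t := valN_nonneg t ht
      have hv' : valN (x :: t) < 10 ^ (t.length - q) := by
        simpa using hv
      have hq : q ≤ t.length := by simpa using hp
      have hpow : (10:Int) ^ (t.length - q) ≤ 10 ^ t.length :=
        pow_le_pow_right₀ (by omega) (by omega)
      rw [valN_cons] at hv'
      have hx0 : x = 0 := by
        by_contra hx0
        have h1 : (10:Int) ^ t.length ≤ x * 10 ^ t.length :=
          le_mul_of_one_le_left (by positivity) (by omega)
        omega
      subst hx0
      match k with
      | 0 => rfl
      | k+1 =>
        have : valN t < 10 ^ (t.length - q) := by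
          simpa using hv'
        exact ih ht q hq this k (by omega)


-- the big-endian decimal digit characters of v (what Nat.toDigits 10 computes)
def myToChars (v : Nat) : List Char :=
  if v < 10 then [Nat.digitChar (v % 10)]
  else myToChars (v / 10) ++ [Nat.digitChar (v % 10)]
  decreasing_by exact Nat.div_lt_self (k := 10) (by omega) (by omega)

theorem toDigitsCore_eq (v : Nat) : ∀ (f : Nat) (l : List Char), v < f →
    Nat.toDigitsCore 10 f v l = myToChars v ++ l := by
  induction v using Nat.strong_induction_on with
  | _ v ih =>
    intro f l hf
    match f with
    | f+1 =>
      rw [Nat.toDigitsCore, myToChars]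
      by_cases h10 : v < 10
      · have : v / 10 = 0 := Nat.div_eq_of_lt h10
        simp [this, h10]
      · have hds : v / 10 < v := Nat.div_lt_self (k := 10) (by omega) (by omega)
        have hne : ¬ v / 10 = 0 := by omega
        simp only [hne, if_false, h10]
        have hlt : v / 10 < f := by omega
        rw [ih (v/10) (by omega) f _ hlt]
        simp


theorem toChars_nat (v : Nat) : PySem.Int.toChars (v : Int) = myToChars v := by
  have : ¬ ((v:Int) < 0) := by omega
  simp only [PySem.Int.toChars, this, if_false, Int.toNat_natCast, Nat.toDigits]
  rw [toDigitsCore_eq v (v+1) [] (by omega)]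
  simp


theorem digitVal_digitChar (d : Nat) (h : d < 10) : pvDigitVal (Nat.digitChar d) = (d : Int) := by
  interval_cases d <;> decide


theorem toChars_digit (d : Int) (h0 : 0 ≤ d) (h1 : d < 10) :
    PySem.Int.toChars d = [Nat.digitChar d.toNat] := by
  have hv : d = ((d.toNat : Nat) : Int) := by omega
  have h2 : d.toNat < 10 := by omega
  rw [hv, toChars_nat, myToChars, if_pos h2, Nat.mod_eq_of_lt h2, Int.toNat_natCast]


theorem dvals_myToChars (v : Nat) :
    Dig ((myToChars v).map pvDigitVal) ∧ valN ((myToChars v).map pvDigitVal) = (v : Int) := by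
  induction v using Nat.strong_induction_on with
  | _ v ih =>
    rw [myToChars]
    by_cases h10 : v < 10
    · simp only [h10, if_true, List.map_cons, List.map_nil]
      rw [Nat.mod_eq_of_lt h10]
      constructor
      · intro d hd
        simp only [List.mem_singleton] at hd
        rw [hd, digitVal_digitChar v h10]
        omega
      · rw [digitVal_digitChar v h10]
        simp [valN]
    · have hdiv : v / 10 < v := Nat.div_lt_self (k := 10) (by omega) (by omega)
      obtain ⟨ihd, ihv⟩ := ih (v/10) hdiv
      simp only [h10, if_false, List.map_append, List.map_cons, List.map_nil]
      have hm : v % 10 < 10 := Nat.mod_lt _ (by omega)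
      constructor
      · intro d hd
        rcases List.mem_append.mp hd with h | h
        · exact ihd d h
        · simp only [List.mem_singleton] at h
          rw [h, digitVal_digitChar _ hm]
          omega
      · rw [valN_append, ihv, digitVal_digitChar _ hm]
        have : valN [(↑(v % 10) : Int)] = ↑(v % 10) := by simp [valN]
        rw [this]
        simp only [List.length_cons, List.length_nil]
        have := Nat.div_add_mod v 10
        push_cast
        omega


theorem flatten_map_toChars (l : List Int) (hd : Dig l) (hne : l ≠ []) (h0 : l.headD 0 ≠ 0) :
    (l.map PySem.Int.toChars).flatten = myToChars (valN l).toNat := by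
  induction l using List.reverseRecOn with
  | nil => exact absurd rfl hne
  | append_singleton init d ih =>
    have hd' := hd d (by simp)
    by_cases hinit : init = []
    · subst hinit
      simp only [List.nil_append, List.map_cons, List.map_nil, List.flatten] at *
      have hdne : d ≠ 0 := by simpa using h0
      have hval : valN [d] = d := by simp [valN]
      rw [hval, myToChars]
      have h1 : d.toNat < 10 := by omega
      rw [toChars_digit d hd'.1 hd'.2]
      simp [h1, Nat.mod_eq_of_lt h1]
    · rcases List.exists_cons_of_ne_nil hinit with ⟨y, ys, hys⟩
      have hdigi : Dig init := fun e he => hd e (by simp [he])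
      have hh0 : init.headD 0 ≠ 0 := by
        rw [hys] at h0 ⊢
        simpa using h0
      have hpos : 1 ≤ valN init := by
        rw [hys] at hdigi hh0 ⊢
        have hy := hdigi y (by simp)
        have hy0 : y ≠ 0 := by simpa using hh0
        have hyn : 0 ≤ valN ys := valN_nonneg ys (fun e he => hdigi e (by simp [he]))
        rw [valN_cons]
        have hp1 : (1:Int) ≤ 10 ^ ys.length := one_le_pow₀ (by omega)
        have h1 : (1:Int) * 10 ^ ys.length ≤ y * 10 ^ ys.length :=
          mul_le_mul_of_nonneg_right (by omega) (by positivity)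
        omega
      have hval : valN (init ++ [d]) = 10 * valN init + d := by
        rw [valN_append]
        simp [valN]
        ring
      have hV10 : 10 ≤ valN (init ++ [d]) := by omega
      rw [hval, myToChars]
      have hnl : ¬ (10 * valN init + d).toNat < 10 := by omega
      simp only [hnl, if_false]
      have hdivN : (10 * valN init + d).toNat / 10 = (valN init).toNat := by omega
      have hmodN : (10 * valN init + d).toNat % 10 = d.toNat := by omega
      rw [hdivN, hmodN]
      rw [List.map_append, List.flatten_append]
      rw [ih hdigi hinit hh0]
      simp [toChars_digit d hd'.1 hd'.2]


-- getD after set (no single named Mathlib lemma for the getD form)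
theorem getD_set_ne (l : List Int) (i j : Nat) (v : Int) (h : i ≠ j) :
    (l.set i v).getD j 0 = l.getD j 0 := by
  simp [List.getD_eq_getElem?_getD, List.getElem?_set_ne h]

theorem getD_set_self (l : List Int) (i : Nat) (v : Int) (h : i < l.length) :
    (l.set i v).getD i 0 = v := by
  simp [List.getD_eq_getElem?_getD, h]

theorem rowStep_eq (num1 num2 : List Char) (I J : Nat) (R : List Int)
    (hJ : J < num2.length) :
    pvRowStep num1 num2 (I : Int) R ((num2.length : Int) - 1 - (J : Int)) =
      (R.set (I + (num2.length - J))
        ((pvDigitVal (PySem.List.pyGetD num1 (I : Int) ' ') *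
            ((num2.map pvDigitVal).getD (num2.length - 1 - J) 0) +
          R.getD (I + (num2.length - J)) 0) % 10)).set
        (I + (num2.length - (J + 1)))
        (R.getD (I + (num2.length - (J + 1))) 0 +
          (pvDigitVal (PySem.List.pyGetD num1 (I : Int) ' ') *
              ((num2.map pvDigitVal).getD (num2.length - 1 - J) 0) +
            R.getD (I + (num2.length - J)) 0) / 10) := by
  have hj : ((num2.length : Int) - 1 - (J : Int)) = ((num2.length - 1 - J : Nat) : Int) := by
    omega
  rw [pvRowStep, hj]
  have hp2 : (I : Int) + ((num2.length - 1 - J : Nat) : Int) + 1 =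
      ((I + (num2.length - J) : Nat) : Int) := by omega
  have hp1 : (I : Int) + ((num2.length - 1 - J : Nat) : Int) =
      ((I + (num2.length - (J + 1)) : Nat) : Int) := by omega
  rw [hp2, hp1]
  simp only [PySem.List.pyGetD_natCast, PySem.List.pySetD_natCast]
  rw [PySem.Int.mod_eq_emod_of_pos (by norm_num), PySem.Int.floordiv_eq_ediv_of_pos (by norm_num)]
  have hmap : (num2.map pvDigitVal).getD (num2.length - 1 - J) 0 =
      pvDigitVal (num2.getD (num2.length - 1 - J) ' ') := by
    have hidx : num2.length - 1 - J < num2.length := by omega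
    rw [List.getD_eq_getElem _ ' ' hidx,
      List.getD_eq_getElem _ 0 (by simpa using hidx), List.getElem_map]
  rw [hmap]
  have hne : I + (num2.length - J) ≠ I + (num2.length - (J + 1)) := by omega
  rw [getD_set_ne _ _ _ _ hne]

theorem inner_inv (num1 num2 : List Char) (I : Nat) (hI : I < num1.length) (res : List Int)
    (hlen : res.length = num1.length + num2.length)
    (hdig : Dig res)
    (hd1 : 0 ≤ pvDigitVal (PySem.List.pyGetD num1 (I : Int) ' ') ∧
           pvDigitVal (PySem.List.pyGetD num1 (I : Int) ' ') < 10)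
    (hd2 : Dig (num2.map pvDigitVal))
    (J : Nat) (hJ : J ≤ num2.length) :
    (((List.range J).map (fun (k : Nat) => (num2.length : Int) - 1 - (k : Int))).foldl
      (pvRowStep num1 num2 (I : Int)) res).length = num1.length + num2.length ∧
    (∀ k, k < I + (num2.length - J) →
      (((List.range J).map (fun (k : Nat) => (num2.length : Int) - 1 - (k : Int))).foldl
        (pvRowStep num1 num2 (I : Int)) res).getD k 0 = res.getD k 0) ∧
    (∀ k, I + (num2.length - J) < k → k < num1.length + num2.length →
      0 ≤ (((List.range J).map (fun (k : Nat) => (num2.length : Int) - 1 - (k : Int))).foldl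
        (pvRowStep num1 num2 (I : Int)) res).getD k 0 ∧
      (((List.range J).map (fun (k : Nat) => (num2.length : Int) - 1 - (k : Int))).foldl
        (pvRowStep num1 num2 (I : Int)) res).getD k 0 < 10) ∧
    (0 ≤ (((List.range J).map (fun (k : Nat) => (num2.length : Int) - 1 - (k : Int))).foldl
        (pvRowStep num1 num2 (I : Int)) res).getD (I + (num2.length - J)) 0 ∧
      (((List.range J).map (fun (k : Nat) => (num2.length : Int) - 1 - (k : Int))).foldl
        (pvRowStep num1 num2 (I : Int)) res).getD (I + (num2.length - J)) 0 ≤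
        res.getD (I + (num2.length - J)) 0 + 9) ∧
    valN (((List.range J).map (fun (k : Nat) => (num2.length : Int) - 1 - (k : Int))).foldl
        (pvRowStep num1 num2 (I : Int)) res) =
      valN res + pvDigitVal (PySem.List.pyGetD num1 (I : Int) ' ') *
        valN ((num2.map pvDigitVal).drop (num2.length - J)) * 10 ^ (num1.length - 1 - I) := by
  induction J with
  | zero =>
    simp only [List.range_zero, List.map_nil, List.foldl_nil, Nat.sub_zero]
    refine ⟨hlen, ?_, ?_, ?_, ?_⟩
    · intro k _
      trivial
    · intro k hk1 hk2
      exact dig_getD res hdig k (by omega)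
    · have hp : I + num2.length < res.length := by omega
      have := dig_getD res hdig (I + num2.length) hp
      exact ⟨this.1, by omega⟩
    · have hdl : (num2.map pvDigitVal).drop num2.length = [] := by
        apply List.drop_eq_nil_of_le
        simp
      rw [hdl]
      simp [valN]
  | succ J ih =>
    have hJn : J < num2.length := by omega
    obtain ⟨ihlen, ihpre, ihhi, ihpend, ihval⟩ := ih (by omega)
    rw [List.range_succ, List.map_append, List.foldl_append]
    simp only [List.map_cons, List.map_nil, List.foldl_cons, List.foldl_nil]
    rw [rowStep_eq num1 num2 I J _ hJn]
    set R : List Int := (List.map (fun (k : Nat) => (num2.length : Int) - 1 - (k : Int))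
      (List.range J)).foldl (pvRowStep num1 num2 (I : Int)) res with hR
    set d : Int := pvDigitVal (PySem.List.pyGetD num1 (I : Int) ' ') with hd
    set dv : Int := (num2.map pvDigitVal).getD (num2.length - 1 - J) 0 with hdv
    set total : Int := d * dv + R.getD (I + (num2.length - J)) 0 with htotal
    set P2 : Nat := I + (num2.length - J) with hP2
    set P1 : Nat := I + (num2.length - (J + 1)) with hP1
    have hP2len : P2 < num1.length + num2.length := by omega
    have hP1len : P1 < num1.length + num2.length := by omega
    have hP12 : P2 = P1 + 1 := by omega
    have hdvb : 0 ≤ dv ∧ dv < 10 := by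
      rw [hdv]
      have hidx : num2.length - 1 - J < (num2.map pvDigitVal).length := by simp; omega
      rw [List.getD_eq_getElem _ 0 hidx]
      exact hd2 _ (List.getElem_mem hidx)
    have hrp2 : 0 ≤ R.getD P2 0 ∧ R.getD P2 0 ≤ res.getD P2 0 + 9 := ihpend
    have hresp2 := dig_getD res hdig P2 (by omega)
    have htb : 0 ≤ total ∧ total ≤ 99 := by
      constructor
      · have := mul_nonneg hd1.1 hdvb.1
        omega
      · have : d * dv ≤ 9 * 9 := by nlinarith [hd1.1, hd1.2, hdvb.1, hdvb.2]
        omega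
    -- the two writes
    have hg2 : ∀ k, k ≠ P2 → k ≠ P1 →
        (((R.set P2 (total % 10)).set P1 (R.getD P1 0 + total / 10))).getD k 0 = R.getD k 0 := by
      intro k hk2 hk1
      rw [getD_set_ne _ _ _ _ (fun h => hk1 h.symm), getD_set_ne _ _ _ _ (fun h => hk2 h.symm)]
    have hgP2 : (((R.set P2 (total % 10)).set P1 (R.getD P1 0 + total / 10))).getD P2 0 =
        total % 10 := by
      rw [getD_set_ne _ _ _ _ (by omega), getD_set_self _ _ _ (by omega)]
    have hgP1 : (((R.set P2 (total % 10)).set P1 (R.getD P1 0 + total / 10))).getD P1 0 =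
        R.getD P1 0 + total / 10 := by
      rw [getD_set_self _ _ _ (by simp [List.length_set]; omega)]
    have hRP1 : R.getD P1 0 = res.getD P1 0 := ihpre P1 (by omega)
    refine ⟨?_, ?_, ?_, ?_, ?_⟩
    · simp [List.length_set, ihlen]
    · intro k hk
      rw [hg2 k (by omega) (by omega)]
      exact ihpre k (by omega)
    · intro k hk1 hk2
      by_cases hk : k = P2
      · subst hk
        rw [hgP2]
        omega
      · rw [hg2 k hk (by omega)]
        exact ihhi k (by omega) hk2
    · rw [hgP1, hRP1]
      have := dig_getD res hdig P1 (by omega)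
      omega
    · have hs1 : valN (R.set P2 (total % 10)) =
          valN R + (total % 10 - R.getD P2 0) * 10 ^ (num1.length + num2.length - 1 - P2) := by
        have := valN_set R P2 (by omega) (total % 10)
        rw [ihlen] at this
        exact this
      have hs2 : valN ((R.set P2 (total % 10)).set P1 (R.getD P1 0 + total / 10)) =
          valN (R.set P2 (total % 10)) + (total / 10) *
            10 ^ (num1.length + num2.length - 1 - P1) := by
        have hlen1 : (R.set P2 (total % 10)).length = num1.length + num2.length := by
          simp [List.length_set, ihlen]
        have := valN_set (R.set P2 (total % 10)) P1 (by omega) (R.getD P1 0 + total / 10)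
        rw [hlen1, getD_set_ne _ _ _ _ (by omega)] at this
        rw [this]
        ring
      have hpow : (10:Int) ^ (num1.length + num2.length - 1 - P1) =
          10 * 10 ^ (num1.length + num2.length - 1 - P2) := by
        rw [hP12]
        rw [show num1.length + num2.length - 1 - P1 = (num1.length + num2.length - 1 - (P1+1)) + 1 from by omega]
        ring
      have hdrop : (num2.map pvDigitVal).drop (num2.length - (J + 1)) =
          dv :: (num2.map pvDigitVal).drop (num2.length - J) := by
        have hidx : num2.length - (J + 1) < (num2.map pvDigitVal).length := by simp; omega
        rw [List.drop_eq_getElem_cons hidx]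
        congr 1
        · rw [hdv, List.getD_eq_getElem _ 0 (by simp; omega)]
          congr 1
          omega
        · congr 1
          omega
      have hlendrop : ((num2.map pvDigitVal).drop (num2.length - J)).length = J := by
        simp [List.length_drop]
        omega
      have hpowJ : (10:Int) ^ (num1.length + num2.length - 1 - P2) =
          10 ^ J * 10 ^ (num1.length - 1 - I) := by
        rw [← pow_add]
        congr 1
        omega
      rw [hs2, hs1, ihval, hdrop, valN_cons, hlendrop]
      have hdm : total % 10 + 10 * (total / 10) = total := by omega
      calc valN res + d * valN ((num2.map pvDigitVal).drop (num2.length - J)) *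
            10 ^ (num1.length - 1 - I) +
            (total % 10 - R.getD P2 0) * 10 ^ (num1.length + num2.length - 1 - P2) +
            total / 10 * 10 ^ (num1.length + num2.length - 1 - P1)
          = valN res + d * valN ((num2.map pvDigitVal).drop (num2.length - J)) *
            10 ^ (num1.length - 1 - I) +
            (total - R.getD P2 0) * 10 ^ (num1.length + num2.length - 1 - P2) := by
            rw [hpow]
            linear_combination (10 ^ (num1.length + num2.length - 1 - P2) : Int) * hdm
      _ = valN res + d * (dv * 10 ^ J + valN ((num2.map pvDigitVal).drop (num2.length - J))) *
            10 ^ (num1.length - 1 - I) := by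
            rw [show total - R.getD P2 0 = d * dv from by omega, hpowJ]
            ring


theorem valN_replicate (t : Nat) : valN (List.replicate t 0) = 0 := by
  induction t with
  | zero => simp [valN]
  | succ t ih => rw [List.replicate_succ, valN_cons, ih]; ring

theorem row_lemma (num1 num2 : List Char) (I : Nat) (hI : I < num1.length) (res : List Int)
    (hlen : res.length = num1.length + num2.length)
    (hdig : Dig res)
    (hzero : ∀ k ≤ I, res.getD k 0 = 0)
    (hd1 : 0 ≤ pvDigitVal (PySem.List.pyGetD num1 (I : Int) ' ') ∧
           pvDigitVal (PySem.List.pyGetD num1 (I : Int) ' ') < 10)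
    (hd2 : Dig (num2.map pvDigitVal)) :
    ((PySem.List.pyRange ((num2.length : Int) - 1) (-1) (-1)).foldl
      (pvRowStep num1 num2 (I : Int)) res).length = res.length ∧
    Dig ((PySem.List.pyRange ((num2.length : Int) - 1) (-1) (-1)).foldl
      (pvRowStep num1 num2 (I : Int)) res) ∧
    (∀ k < I, ((PySem.List.pyRange ((num2.length : Int) - 1) (-1) (-1)).foldl
      (pvRowStep num1 num2 (I : Int)) res).getD k 0 = 0) ∧
    valN ((PySem.List.pyRange ((num2.length : Int) - 1) (-1) (-1)).foldl
      (pvRowStep num1 num2 (I : Int)) res) =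
      valN res + pvDigitVal (PySem.List.pyGetD num1 (I : Int) ' ') *
        valN (num2.map pvDigitVal) * 10 ^ (num1.length - 1 - I) := by
  have hrange : PySem.List.pyRange ((num2.length : Int) - 1) (-1) (-1) =
      (List.range num2.length).map (fun (k : Nat) => (num2.length : Int) - 1 - (k : Int)) := by
    rw [PySem.List.pyRange_neg_one]
    have h1 : ((num2.length : Int) - 1 - (-1)).toNat = num2.length := by omega
    rw [h1]
  rw [hrange]
  obtain ⟨h1, h2, h3, h4, h5⟩ :=
    inner_inv num1 num2 I hI res hlen hdig hd1 hd2 num2.length le_rfl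
  simp only [Nat.sub_self, Nat.add_zero, List.drop_zero] at h1 h2 h3 h4 h5
  refine ⟨by rw [h1, hlen], ?_, ?_, h5⟩
  · intro e he
    obtain ⟨k, hk, hke⟩ := List.mem_iff_getElem.mp he
    have hgd : e = (((List.range num2.length).map
        (fun (k : Nat) => (num2.length : Int) - 1 - (k : Int))).foldl
        (pvRowStep num1 num2 (I : Int)) res).getD k 0 := by
      rw [List.getD_eq_getElem _ 0 hk, hke]
    have hkL : k < num1.length + num2.length := by rwa [h1] at hk
    rcases lt_trichotomy k I with hkI | hkI | hkI
    · rw [hgd, h2 k (by omega), hzero k (by omega)]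
      omega
    · subst hkI
      have := hzero k le_rfl
      rw [hgd]
      omega
    · have := h3 k (by omega) hkL
      rw [hgd]
      omega
  · intro k hk
    rw [h2 k (by omega)]
    exact hzero k (by omega)

theorem outer_lemma (num1 num2 : List Char)
    (hd1 : Dig (num1.map pvDigitVal)) (hd2 : Dig (num2.map pvDigitVal)) :
    ((PySem.List.pyRange ((num1.length : Int) - 1) (-1) (-1)).foldl
      (fun r i => (PySem.List.pyRange ((num2.length : Int) - 1) (-1) (-1)).foldl
        (pvRowStep num1 num2 i) r) (List.replicate (num1.length + num2.length) (0 : Int))).length =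
      num1.length + num2.length ∧
    Dig ((PySem.List.pyRange ((num1.length : Int) - 1) (-1) (-1)).foldl
      (fun r i => (PySem.List.pyRange ((num2.length : Int) - 1) (-1) (-1)).foldl
        (pvRowStep num1 num2 i) r) (List.replicate (num1.length + num2.length) (0 : Int))) ∧
    valN ((PySem.List.pyRange ((num1.length : Int) - 1) (-1) (-1)).foldl
      (fun r i => (PySem.List.pyRange ((num2.length : Int) - 1) (-1) (-1)).foldl
        (pvRowStep num1 num2 i) r) (List.replicate (num1.length + num2.length) (0 : Int))) =
      valN (num1.map pvDigitVal) * valN (num2.map pvDigitVal) := by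
  have hrange : PySem.List.pyRange ((num1.length : Int) - 1) (-1) (-1) =
      (List.range num1.length).map (fun (k : Nat) => (num1.length : Int) - 1 - (k : Int)) := by
    rw [PySem.List.pyRange_neg_one]
    have h1 : ((num1.length : Int) - 1 - (-1)).toNat = num1.length := by omega
    rw [h1]
  rw [hrange]
  suffices H : ∀ K ≤ num1.length,
      (((List.range K).map (fun (k : Nat) => (num1.length : Int) - 1 - (k : Int))).foldl
        (fun r i => (PySem.List.pyRange ((num2.length : Int) - 1) (-1) (-1)).foldl
          (pvRowStep num1 num2 i) r)
        (List.replicate (num1.length + num2.length) (0 : Int))).length =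
        num1.length + num2.length ∧
      Dig (((List.range K).map (fun (k : Nat) => (num1.length : Int) - 1 - (k : Int))).foldl
        (fun r i => (PySem.List.pyRange ((num2.length : Int) - 1) (-1) (-1)).foldl
          (pvRowStep num1 num2 i) r)
        (List.replicate (num1.length + num2.length) (0 : Int))) ∧
      valN (((List.range K).map (fun (k : Nat) => (num1.length : Int) - 1 - (k : Int))).foldl
        (fun r i => (PySem.List.pyRange ((num2.length : Int) - 1) (-1) (-1)).foldl
          (pvRowStep num1 num2 i) r)
        (List.replicate (num1.length + num2.length) (0 : Int))) =
        valN ((num1.map pvDigitVal).drop (num1.length - K)) * valN (num2.map pvDigitVal) by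
    have := H num1.length le_rfl
    simpa using this
  intro K
  induction K with
  | zero =>
    intro _
    simp only [List.range_zero, List.map_nil, List.foldl_nil]
    refine ⟨List.length_replicate, ?_, ?_⟩
    · intro e he
      rw [List.eq_of_mem_replicate he]
      omega
    · rw [Nat.sub_zero, List.drop_eq_nil_of_le (by simp), valN_replicate]
      simp [valN]
  | succ K ih =>
    intro hK1
    have hK : K < num1.length := by omega
    obtain ⟨ihlen, ihdig, ihval⟩ := ih (by omega)
    rw [List.range_succ, List.map_append, List.foldl_append]
    simp only [List.map_cons, List.map_nil, List.foldl_cons, List.foldl_nil]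
    set RK := ((List.range K).map (fun (k : Nat) => (num1.length : Int) - 1 - (k : Int))).foldl
      (fun r i => (PySem.List.pyRange ((num2.length : Int) - 1) (-1) (-1)).foldl
        (pvRowStep num1 num2 i) r)
      (List.replicate (num1.length + num2.length) (0 : Int)) with hRK
    set I : Nat := num1.length - 1 - K with hIdef
    have hIlt : I < num1.length := by omega
    have hicast : (num1.length : Int) - 1 - (K : Int) = ((I : Nat) : Int) := by omega
    rw [hicast]
    -- digit of num1 at I
    have hd1I : 0 ≤ pvDigitVal (PySem.List.pyGetD num1 (I : Int) ' ') ∧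
        pvDigitVal (PySem.List.pyGetD num1 (I : Int) ' ') < 10 := by
      rw [PySem.List.pyGetD_natCast, List.getD_eq_getElem _ ' ' hIlt]
      exact hd1 _ (by
        have : pvDigitVal num1[I] = (num1.map pvDigitVal)[I]'(by simpa using hIlt) := by
          simp
        rw [this]
        exact List.getElem_mem _)
    -- leading zeros of the accumulated result
    have hdrop : Dig ((num1.map pvDigitVal).drop (num1.length - K)) :=
      fun e he => hd1 e (List.mem_of_mem_drop he)
    have hdroplen : ((num1.map pvDigitVal).drop (num1.length - K)).length = K := by
      simp [List.length_drop]
      omega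
    have ha : 0 ≤ valN ((num1.map pvDigitVal).drop (num1.length - K)) ∧
        valN ((num1.map pvDigitVal).drop (num1.length - K)) < 10 ^ K := by
      refine ⟨valN_nonneg _ hdrop, ?_⟩
      have := valN_lt _ hdrop
      rwa [hdroplen] at this
    have hb : 0 ≤ valN (num2.map pvDigitVal) ∧
        valN (num2.map pvDigitVal) < 10 ^ num2.length := by
      refine ⟨valN_nonneg _ hd2, ?_⟩
      have := valN_lt _ hd2
      rwa [List.length_map] at this
    have hvalKlt : valN RK < 10 ^ (num1.length + num2.length - (I + 1)) := by
      rw [ihval]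
      have hx1 : (1:Int) ≤ 10 ^ K := one_le_pow₀ (by omega)
      have hx2 : (1:Int) ≤ 10 ^ num2.length := one_le_pow₀ (by omega)
      have hle : valN ((num1.map pvDigitVal).drop (num1.length - K)) * valN (num2.map pvDigitVal) ≤
          (10 ^ K - 1) * (10 ^ num2.length - 1) :=
        mul_le_mul (by omega) (by omega) hb.1 (by omega)
      have hexp : num1.length + num2.length - (I + 1) = K + num2.length := by omega
      rw [hexp, pow_add]
      nlinarith
    have hzeroK : ∀ k ≤ I, RK.getD k 0 = 0 := by
      intro k hk
      exact zeros_of_lt RK ihdig (I + 1) (by omega) (by rwa [ihlen]) k (by omega)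
    obtain ⟨rlen, rdig, _, rval⟩ :=
      row_lemma num1 num2 I hIlt RK ihlen ihdig hzeroK hd1I hd2
    refine ⟨by rw [rlen, ihlen], rdig, ?_⟩
    rw [rval, ihval]
    -- peel the next digit of num1
    have hidx : I < (num1.map pvDigitVal).length := by simp; omega
    have hpeel : (num1.map pvDigitVal).drop (num1.length - (K + 1)) =
        (num1.map pvDigitVal)[I] :: (num1.map pvDigitVal).drop (num1.length - K) := by
      rw [show num1.length - (K + 1) = I from by omega]
      rw [List.drop_eq_getElem_cons hidx, show I + 1 = num1.length - K from by omega]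
    have hdI : pvDigitVal (PySem.List.pyGetD num1 (I : Int) ' ') =
        (num1.map pvDigitVal)[I]'hidx := by
      rw [PySem.List.pyGetD_natCast, List.getD_eq_getElem _ ' ' hIlt, List.getElem_map]
    have hexpI : num1.length - 1 - I = K := by omega
    rw [hpeel, valN_cons, hdroplen, hexpI, hdI]
    ring

theorem valN_drop_lead (l : List Int) : valN (l.drop (pvLeadZeros l)) = valN l := by
  induction l with
  | nil => simp
  | cons x t ih =>
    rw [pvLeadZeros]
    split
    · rename_i hx
      subst hx
      rw [List.drop_succ_cons, ih, valN_cons]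
      ring
    · simp


theorem head_drop_lead (l : List Int) (h : pvLeadZeros l < l.length) :
    (l.drop (pvLeadZeros l)).headD 0 ≠ 0 := by
  induction l with
  | nil => simp at h
  | cons x t ih =>
    rw [pvLeadZeros] at h ⊢
    by_cases hx : x = 0
    · simp only [hx, if_true] at h ⊢
      rw [List.drop_succ_cons]
      exact ih (by simpa using h)
    · simp [hx]

theorem multiply_correct (a b : Nat) (ha : 1 ≤ a) (hb : 1 ≤ b) :
    pvMultiplyStrings (PySem.Int.toChars (a : Int)) (PySem.Int.toChars (b : Int)) =
      PySem.Int.toChars ((a * b : Nat) : Int) := by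
  rw [pvMultiplyStrings, toChars_nat a, toChars_nat b, toChars_nat (a*b)]
  obtain ⟨hlen, hdig, hval⟩ :=
    outer_lemma (myToChars a) (myToChars b) (dvals_myToChars a).1 (dvals_myToChars b).1
  rw [(dvals_myToChars a).2, (dvals_myToChars b).2] at hval
  set res := (PySem.List.pyRange (((myToChars a).length : Int) - 1) (-1) (-1)).foldl
    (fun r i => (PySem.List.pyRange (((myToChars b).length : Int) - 1) (-1) (-1)).foldl
      (pvRowStep (myToChars a) (myToChars b) i) r)
    (List.replicate ((myToChars a).length + (myToChars b).length) (0 : Int)) with hres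
  have hpos : 1 ≤ valN res := by
    rw [hval]
    exact_mod_cast Nat.one_le_iff_ne_zero.mpr (Nat.mul_ne_zero (by omega) (by omega))
  have hstart : pvLeadZeros res < res.length := by
    by_contra hc
    have he : res.drop (pvLeadZeros res) = [] := List.drop_eq_nil_of_le (by omega)
    have := valN_drop_lead res
    rw [he, show valN ([] : List Int) = 0 from rfl] at this
    omega
  rw [if_pos hstart, PySem.List.slice_from_natCast]
  have hne : res.drop (pvLeadZeros res) ≠ [] := by
    apply List.ne_nil_of_length_pos
    simp [List.length_drop]
    omega
  have hd' : Dig (res.drop (pvLeadZeros res)) := fun e he => hdig e (List.mem_of_mem_drop he)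
  rw [flatten_map_toChars _ hd' hne (head_drop_lead res hstart), valN_drop_lead, hval]
  rw [show ((a:Int) * (b:Int)).toNat = a * b from by rw [← Nat.cast_mul, Int.toNat_natCast]]


theorem fact_fold (k : Nat) (hk : 1 ≤ k) : ∃ P : Nat, 1 ≤ P ∧
    (PySem.List.pyRange 2 ((k : Int) + 1) 1).foldl (fun result i => result * i) 1 = (P : Int) ∧
    (PySem.List.pyRange 2 ((k : Int) + 1) 1).foldl
      (fun result i => pvMultiplyStrings result (PySem.Int.toChars i)) ['1'] =
      PySem.Int.toChars (P : Int) := by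
  induction k with
  | zero => omega
  | succ k ih =>
    by_cases hk0 : k = 0
    · subst hk0
      refine ⟨1, le_rfl, ?_, ?_⟩ <;>
        rw [show ((1:Nat):Int) + 1 = 2 from by norm_num,
          PySem.List.pyRange_one_eq_nil (by norm_num)] <;> simp <;> decide
    · obtain ⟨P, hP1, hPint, hPstr⟩ := ih (by omega)
      refine ⟨P * (k + 1), by exact Nat.mul_pos (by omega) (by omega), ?_, ?_⟩
      · rw [show ((k+1:Nat):Int) + 1 = ((k:Int)+1)+1 from by push_cast; ring,
          PySem.List.pyRange_one_succ_right (by omega), List.foldl_append, hPint]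
        simp only [List.foldl_cons, List.foldl_nil]
        push_cast
        ring
      · rw [show ((k+1:Nat):Int) + 1 = ((k:Int)+1)+1 from by push_cast; ring,
          PySem.List.pyRange_one_succ_right (by omega), List.foldl_append, hPstr]
        simp only [List.foldl_cons, List.foldl_nil]
        rw [show ((k:Int)+1) = ((k+1:Nat):Int) from by push_cast; ring]
        exact multiply_correct P (k+1) hP1 (by omega)


-- ===== VERDICT (by name: the statement is the Claim_ definition above) =====
theorem factorial_big_int_spec : Claim_equal_factorial_big_int := by
  intro n _ hpre
  show factorial_big_int n = factorial_big_int_alt n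
  rw [factorial_big_int, factorial_big_int_alt]
  have hn0 : ¬ n < 0 := not_lt.mpr hpre
  simp only [hn0, if_false]
  by_cases h1 : n ≤ 1
  · rw [if_pos h1, PySem.List.pyRange_one_eq_nil (by omega), List.foldl_nil]
    rfl
  · rw [if_neg h1]
    obtain ⟨k, hk⟩ : ∃ k : Nat, n = (k : Int) := ⟨n.toNat, by omega⟩
    subst hk
    obtain ⟨P, _, hPint, hPstr⟩ := fact_fold k (by omega)
    rw [hPint, hPstr, PySem.Int.toStr]
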